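-- pv_equiv track=rewrite | github.com/futurulus/wiinaq | dictionary/parse_combined.py | parse_varieties
-- ===== SOURCE A (Python) =====
-- VARIETIES = {
--     'K': 'Koniag (includes Kodiak and Alaska Peninsula)',
--     'AP': 'Alaska Peninsula',
--     'PERRY': 'Perryville',
--     'KOD': 'Kodiak and adjoining islands',
--     'C': 'Chugach (includes Kenai Peninsula and Prince William Sound)',
--     'KP': 'Kenai Peninsula',
--     'PWS': 'Prince William Sound',
--     '': 'other varieties',
-- }
--
-- def parse_varieties(value):
--     '''
--     >>> parse_varieties('C KOD [N]')
--     [('C', ''), ('KOD', '[N]')]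
--     >>> parse_varieties('StL [K]')
--     [('', 'StL'), ('K', '')]
--     >>> parse_varieties('C [except not]')
--     [('C', '[except not]')]
--     '''
--     # >>> parse_varieties('AP ~(???)~ C')
--     # [('AP', '~(???)~'), ('C', '')]  # skip for now
--     result = []
--     detail = ''
--     tokens = value.split()
--     while tokens:
--         while tokens and remove_punct(tokens[-1]) not in VARIETIES:
--             detail = ' '.join((tokens.pop(), detail))
--         if tokens:
--             result.append((remove_punct(tokens.pop()), detail.strip()))
--             detail = ''
--
--     if detail.strip():
--         result.append(('', detail.strip()))
--
--     result.reverse()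
--     return result
--
-- def remove_punct(token):
--     return ''.join(c for c in token if c.isalnum())
-- ===== SOURCE B (Python) =====
-- VARIETIES = {
--     'K': 'Koniag (includes Kodiak and Alaska Peninsula)',
--     'AP': 'Alaska Peninsula',
--     'PERRY': 'Perryville',
--     'KOD': 'Kodiak and adjoining islands',
--     'C': 'Chugach (includes Kenai Peninsula and Prince William Sound)',
--     'KP': 'Kenai Peninsula',
--     'PWS': 'Prince William Sound',
--     '': 'other varieties',
-- }
--
--
-- def remove_punct(token):
--     return ''.join(c for c in token if c.isalnum())
--
--
-- def _flush(current, details):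
--     """One output group: a leading detail-only group is emitted only if non-empty."""
--     if current is None:
--         return [('', ' '.join(details))] if details else []
--     return [(current, ' '.join(details))]
--
--
-- def parse_varieties(value):
--     # Single forward pass: group each variety code with the detail tokens after it.
--     result = []
--     current = None
--     details = []
--     for tok in value.split():
--         key = remove_punct(tok)
--         if key in VARIETIES:
--             result += _flush(current, details)
--             current = key
--             details = []
--         else:
--             details.append(tok)
--     result += _flush(current, details)
--     return result
-- ===== Notes on version B (the rewrite author's own statement) =====
-- stated objective: simpler
-- what changed: A scans the token list right-to-left with nested while loops, destructively popping tokens, prepending onto a growing detail string and reversing the result list; B is a single forward pass that flushes the pending (variety, detail-tokens) group whenever a variety code is seen and joins each group's tokens once at the end.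
import Mathlib
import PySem

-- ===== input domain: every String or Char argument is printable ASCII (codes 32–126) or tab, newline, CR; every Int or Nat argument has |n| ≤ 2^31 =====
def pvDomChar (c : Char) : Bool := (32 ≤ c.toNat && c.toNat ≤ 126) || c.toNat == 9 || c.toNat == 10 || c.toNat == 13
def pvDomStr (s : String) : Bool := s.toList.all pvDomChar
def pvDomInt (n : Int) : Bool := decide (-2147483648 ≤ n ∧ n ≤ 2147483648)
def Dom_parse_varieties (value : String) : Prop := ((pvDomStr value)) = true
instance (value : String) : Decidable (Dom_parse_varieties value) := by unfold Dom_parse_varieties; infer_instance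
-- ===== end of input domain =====

-- B replaces A's destructive right-to-left double-while pop loop (building details by
-- string prepending and reversing the result) with a single forward pass that groups
-- detail tokens after each variety code; objective: simpler decomposition, same cost.


-- ===== PORT A =====
-- the module-level dict VARIETIES (only key membership is ever used)
def VARIETIES : PySem.Dict String String := PySem.Dict.ofList
  [("K", "Koniag (includes Kodiak and Alaska Peninsula)"),
   ("AP", "Alaska Peninsula"),
   ("PERRY", "Perryville"),
   ("KOD", "Kodiak and adjoining islands"),
   ("C", "Chugach (includes Kenai Peninsula and Prince William Sound)"),
   ("KP", "Kenai Peninsula"),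
   ("PWS", "Prince William Sound"),
   ("", "other varieties")]

-- ''.join(c for c in token if c.isalnum())
def remove_punct (token : String) : String :=
  String.ofList (token.toList.filter PySem.Chars.isalnum)

-- A's nested whiles, popping tokens from the right; the trailing `if detail.strip():`
-- is the tokens-empty exit of the loop.
def loopA (ts : List String) (detail : String) (result : List (String × String)) :
    List (String × String) :=
  match h : ts.getLast? with
  | none =>
      if PySem.Str.strip detail ≠ "" then result ++ [("", PySem.Str.strip detail)] else result
  | some t =>
      if VARIETIES.contains (remove_punct t) then
        loopA ts.dropLast "" (result ++ [(remove_punct t, PySem.Str.strip detail)])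
      else
        loopA ts.dropLast (PySem.Str.join " " [t, detail]) result
termination_by ts.length
decreasing_by
  all_goals
    (have hne : ts ≠ [] := by rintro rfl; simp at h
     have : 0 < ts.length := List.length_pos_iff.mpr hne
     simp [List.length_dropLast]; omega)

def parse_varieties (value : String) : List (String × String) :=
  (loopA (PySem.Str.split₀ value) "" []).reverse

-- ===== PORT B =====
-- _flush(current, details)
def flushB (current : Option String) (details : List String) : List (String × String) :=
  match current with
  | none => if details ≠ [] then [("", PySem.Str.join " " details)] else []
  | some v => [(v, PySem.Str.join " " details)]

-- the body of B's for-loop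
def stepB (st : List (String × String) × Option String × List String) (tok : String) :
    List (String × String) × Option String × List String :=
  let key := remove_punct tok
  if VARIETIES.contains key then
    (st.1 ++ flushB st.2.1 st.2.2, some key, [])
  else
    (st.1, st.2.1, st.2.2 ++ [tok])

def parse_varieties_alt (value : String) : List (String × String) :=
  let st := (PySem.Str.split₀ value).foldl stepB ([], none, [])
  st.1 ++ flushB st.2.1 st.2.2

-- ===== PRECONDITION & SPEC =====
def Spec_parse_varieties (value : String) (out : List (String × String)) : Prop := out = parse_varieties_alt value
instance (value : String) (out : List (String × String)) : Decidable (Spec_parse_varieties value out) := by unfold Spec_parse_varieties; infer_instance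

-- ===== CLAIM (what is proved, stated in full; the proofs are below) =====
def Claim_equal_parse_varieties : Prop := ∀ (value : String), Dom_parse_varieties value → Spec_parse_varieties value (parse_varieties value)

-- ===== LEMMAS AND PROOFS =====

-- a token as produced by str.split(): non-empty and whitespace-free
def goodTok (t : String) : Prop :=
  t ≠ "" ∧ ∀ c ∈ t.toList, PySem.Chars.isspace c = false

-- A's detail accumulator after absorbing the token group L (leftmost token first):
-- each step is ' '.join((tok, detail)) = tok ++ " " ++ detail
def detailOf (L : List String) : String :=
  match L with
  | [] => ""
  | t :: L' => PySem.Str.join " " [t, detailOf L']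

-- the char-level join with separator ' '
def joinC (L : List String) : List Char :=
  PySem.Chars.join [' '] (L.map String.toList)

lemma go_good (s : List Char) : ∀ (cur : List Char) (acc : List (List Char)),
    (∀ c ∈ cur, PySem.Chars.isspace c = false) →
    (∀ l ∈ acc, l ≠ [] ∧ ∀ c ∈ l, PySem.Chars.isspace c = false) →
    ∀ t ∈ PySem.Chars.split₀.go s cur acc, t ≠ [] ∧ ∀ c ∈ t, PySem.Chars.isspace c = false := by
  induction s with
  | nil =>
      intro cur acc hcur hacc t ht
      rw [PySem.Chars.split₀.go] at ht
      split at ht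
      · exact hacc t (List.mem_reverse.mp ht)
      · next hcurne =>
        rcases List.mem_cons.mp (List.mem_reverse.mp ht) with heq | hmem
        · rw [heq]
          refine ⟨?_, ?_⟩
          · simp only [ne_eq, List.reverse_eq_nil_iff]
            intro h; exact hcurne (by simp [h])
          · intro c hc
            exact hcur c (List.mem_reverse.mp hc)
        · exact hacc t hmem
  | cons c rest ih =>
      intro cur acc hcur hacc t ht
      rw [PySem.Chars.split₀.go] at ht
      split at ht
      · split at ht
        · exact ih [] acc (by simp) hacc t ht
        · next hcurne =>
          refine ih [] (cur.reverse :: acc) (by simp) ?_ t ht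
          intro l hl
          rcases List.mem_cons.mp hl with heq | hl2
          · rw [heq]
            refine ⟨?_, ?_⟩
            · simp only [ne_eq, List.reverse_eq_nil_iff]
              intro h; exact hcurne (by simp [h])
            · intro c' hc'
              exact hcur c' (List.mem_reverse.mp hc')
          · exact hacc l hl2
      · next hc =>
        refine ih (c :: cur) acc ?_ hacc t ht
        intro c' hc'
        rcases List.mem_cons.mp hc' with heq | hc2
        · rw [heq]
          simp only [Bool.not_eq_true] at hc
          exact hc
        · exact hcur c' hc2

lemma split₀_good (value : String) : ∀ t ∈ PySem.Str.split₀ value, goodTok t := by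
  intro t ht
  have hmem : t.toList ∈ PySem.Chars.split₀ value.toList := by
    rw [← PySem.Str.split₀_map_toList]
    exact List.mem_map_of_mem ht
  have h := go_good value.toList [] [] (by simp) (by simp) t.toList
    (by simpa [PySem.Chars.split₀] using hmem)
  refine ⟨?_, h.2⟩
  intro h0
  rw [h0] at h
  exact absurd (by simp) h.1

lemma joinC_ne_nil (L : List String) (hL : ∀ t ∈ L, goodTok t) (hne : L ≠ []) :
    joinC L ≠ [] := by
  obtain ⟨t, L', rfl⟩ : ∃ t L', L = t :: L' := by
    cases L with
    | nil => exact absurd rfl hne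
    | cons t L' => exact ⟨t, L', rfl⟩
  have htne : t.toList ≠ [] := by
    have := (hL t (by simp)).1
    simpa using this
  cases L' with
  | nil => simpa [joinC, PySem.Chars.join_singleton] using htne
  | cons u L'' =>
      simp only [joinC, List.map_cons, PySem.Chars.join_cons_cons]
      intro hcontra
      simp [htne] at hcontra

lemma joinC_head (L : List String) (hL : ∀ t ∈ L, goodTok t) (hne : L ≠ []) :
    ∃ c, (joinC L).head? = some c ∧ PySem.Chars.isspace c = false := by
  obtain ⟨t, L', rfl⟩ : ∃ t L', L = t :: L' := by
    cases L with
    | nil => exact absurd rfl hne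
    | cons t L' => exact ⟨t, L', rfl⟩
  obtain ⟨c, cs, hts⟩ : ∃ c cs, t.toList = c :: cs := by
    have := (hL t (by simp)).1
    cases hts : t.toList with
    | nil => exact absurd (String.toList_inj.mp (by simpa using hts)) this
    | cons c cs => exact ⟨c, cs, rfl⟩
  have hcmem : c ∈ t.toList := by rw [hts]; exact List.mem_cons_self
  refine ⟨c, ?_, (hL t (by simp)).2 c hcmem⟩
  cases L' with
  | nil => simp [joinC, PySem.Chars.join_singleton, hts]
  | cons u L'' => simp [joinC, PySem.Chars.join_cons_cons, hts]

lemma joinC_last (L : List String) (hL : ∀ t ∈ L, goodTok t) (hne : L ≠ []) :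
    ∃ c, (joinC L).getLast? = some c ∧ PySem.Chars.isspace c = false := by
  induction L with
  | nil => exact absurd rfl hne
  | cons t L' ih =>
      cases L' with
      | nil =>
          have htne : t.toList ≠ [] := by
            have := (hL t (by simp)).1
            simpa using this
          obtain ⟨c, hc⟩ := List.getLast?_isSome.mpr htne |> Option.isSome_iff_exists.mp
          refine ⟨c, by simpa [joinC, PySem.Chars.join_singleton] using hc,
            (hL t (by simp)).2 c (List.mem_of_getLast? hc)⟩
      | cons u L'' =>
          have hL' : ∀ x ∈ u :: L'', goodTok x := fun x hx => hL x (by simp [hx])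
          obtain ⟨c, hc, hcs⟩ := ih hL' (by simp)
          refine ⟨c, ?_, hcs⟩
          have hjne : joinC (u :: L'') ≠ [] := joinC_ne_nil _ hL' (by simp)
          simp only [joinC, List.map_cons] at hjne hc
          simp only [joinC, List.map_cons, PySem.Chars.join_cons_cons]
          rw [List.append_assoc,
            List.getLast?_append_of_ne_nil _ (by simp),
            List.getLast?_append_of_ne_nil _ hjne]
          exact hc

lemma strip_snoc_space (cs : List Char) (c0 c1 : Char)
    (h0 : cs.head? = some c0) (h0s : PySem.Chars.isspace c0 = false)
    (h1 : cs.getLast? = some c1) (h1s : PySem.Chars.isspace c1 = false) :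
    PySem.Chars.strip (cs ++ [' ']) = cs := by
  obtain ⟨c, cs', rfl⟩ : ∃ c cs', cs = c :: cs' := by
    cases cs with
    | nil => simp at h0
    | cons c cs' => exact ⟨c, cs', rfl⟩
  have hc0 : c = c0 := by simpa using h0
  have hs : PySem.Chars.isspace c = false := by rw [hc0]; exact h0s
  have hsp : PySem.Chars.isspace ' ' = true := by decide
  simp only [PySem.Chars.strip, PySem.Chars.lstrip, PySem.Chars.rstrip]
  rw [List.cons_append, List.dropWhile_cons, if_neg (by simp [hs])]
  have hrw : (c :: (cs' ++ [' '])).reverse = ' ' :: (c :: cs').reverse := by simp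
  rw [hrw, List.dropWhile_cons, if_pos hsp]
  cases hrev : (c :: cs').reverse with
  | nil => simp at hrev
  | cons a as =>
      have ha : a = c1 := by
        have h2 : ((c :: cs').reverse).head? = (c :: cs').getLast? := List.head?_reverse
        rw [hrev, h1] at h2
        simpa using h2
      have hdw : List.dropWhile PySem.Chars.isspace (a :: as) = a :: as := by
        rw [List.dropWhile_cons, if_neg (by rw [ha]; simp [h1s])]
      rw [hdw, ← hrev, List.reverse_reverse]

lemma detailOf_toList (L : List String) (hL : ∀ t ∈ L, goodTok t) :
    (detailOf L).toList = if L = [] then [] else joinC L ++ [' '] := by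
  induction L with
  | nil => simp [detailOf]
  | cons t L' ih =>
      have hL' : ∀ x ∈ L', goodTok x := fun x hx => hL x (by simp [hx])
      simp only [detailOf, PySem.Str.toList_join, List.map_cons, List.map_nil,
        PySem.Chars.join_cons_cons, PySem.Chars.join_singleton, ih hL']
      cases L' with
      | nil => simp [joinC, PySem.Chars.join_singleton]
      | cons u L'' =>
          simp only [if_neg (by simp : ¬(u :: L'' = []))]
          simp only [if_neg (by simp : ¬(t :: u :: L'' = []))]
          simp only [joinC, List.map_cons, PySem.Chars.join_cons_cons]
          have : (" ".toList) = [' '] := by decide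
          simp [this]

lemma strip_detailOf (L : List String) (hL : ∀ t ∈ L, goodTok t) :
    PySem.Str.strip (detailOf L) = PySem.Str.join " " L := by
  apply String.toList_inj.mp
  rw [PySem.Str.toList_strip, detailOf_toList L hL, PySem.Str.toList_join]
  cases hLe : L with
  | nil => simp [PySem.Chars.strip, PySem.Chars.lstrip, PySem.Chars.rstrip, PySem.Chars.join,
      List.intercalate]
  | cons t L' =>
      rw [← hLe]
      have hne : L ≠ [] := by simp [hLe]
      simp only [if_neg hne]
      obtain ⟨c0, h0, h0s⟩ := joinC_head L hL hne
      obtain ⟨c1, h1, h1s⟩ := joinC_last L hL hne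
      rw [strip_snoc_space (joinC L) c0 c1 h0 h0s h1 h1s]
      simp [joinC]

lemma join_ne_nil (L : List String) (hL : ∀ t ∈ L, goodTok t) (hne : L ≠ []) :
    PySem.Str.join " " L ≠ "" := by
  intro hcontra
  apply joinC_ne_nil L hL hne
  have := congrArg String.toList hcontra
  rw [PySem.Str.toList_join] at this
  simpa [joinC] using this

lemma loopA_nil (d : String) (r : List (String × String)) :
    loopA [] d r =
      if PySem.Str.strip d ≠ "" then r ++ [("", PySem.Str.strip d)] else r := by
  rw [loopA]
  split
  · rfl
  · next t h => simp at h

lemma loopA_snoc (ts : List String) (t : String) (d : String) (r : List (String × String)) :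
    loopA (ts ++ [t]) d r =
      if VARIETIES.contains (remove_punct t) then
        loopA ts "" (r ++ [(remove_punct t, PySem.Str.strip d)])
      else
        loopA ts (PySem.Str.join " " [t, d]) r := by
  rw [loopA]
  split
  · next h => rw [List.getLast?_concat] at h; cases h
  · next t' h =>
      rw [List.getLast?_concat] at h
      cases h
      simp

lemma loopA_acc (ts : List String) : ∀ (d : String) (r : List (String × String)),
    loopA ts d r = r ++ loopA ts d [] := by
  induction ts using List.reverseRecOn with
  | nil =>
      intro d r
      rw [loopA_nil, loopA_nil]
      split_ifs <;> simp
  | append_singleton ts t ih =>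
      intro d r
      rw [loopA_snoc, loopA_snoc]
      split_ifs with hv
      · rw [ih "" (r ++ [(remove_punct t, PySem.Str.strip d)]),
          ih "" ([] ++ [(remove_punct t, PySem.Str.strip d)])]
        simp
      · rw [ih (PySem.Str.join " " [t, d]) r]

lemma main_lemma (ts : List String) (hts : ∀ t ∈ ts, goodTok t) :
    ∀ (L : List String), (∀ t ∈ L, goodTok t) →
    (loopA ts (detailOf L) []).reverse =
      (let st := ts.foldl stepB ([], none, [])
       st.1 ++ flushB st.2.1 (st.2.2 ++ L)) := by
  induction ts using List.reverseRecOn with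
  | nil =>
      intro L hL
      by_cases hL0 : L = []
      · subst hL0
        simp [loopA_nil, detailOf, flushB, PySem.Str.strip, PySem.Chars.strip,
          PySem.Chars.lstrip, PySem.Chars.rstrip]
      · rw [loopA_nil, strip_detailOf L hL]
        have h2 := join_ne_nil L hL hL0
        simp [h2, flushB, hL0]
  | append_singleton ts t ih =>
      intro L hL
      have hts' : ∀ x ∈ ts, goodTok x := fun x hx => hts x (by simp [hx])
      have hgt : goodTok t := hts t (by simp)
      rw [loopA_snoc]
      simp only [List.foldl_append, List.foldl_cons, List.foldl_nil]
      by_cases hv : VARIETIES.contains (remove_punct t) = true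
      · rw [if_pos hv, loopA_acc, List.reverse_append, strip_detailOf L hL]
        have h0 := ih hts' [] (by simp)
        simp only [detailOf] at h0
        simp only [List.append_nil] at h0
        rw [h0]
        simp [stepB, hv, flushB]
      · rw [if_neg hv]
        have h1 := ih hts' (t :: L)
          (by intro x hx
              rcases List.mem_cons.mp hx with heq | hx2
              · rw [heq]; exact hgt
              · exact hL x hx2)
        simp only [detailOf] at h1
        rw [h1]
        simp [stepB, hv, flushB]

-- ===== VERDICT (by name: the statement is the Claim_ definition above) =====
theorem parse_varieties_spec : Claim_equal_parse_varieties := by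
  intro value _
  unfold Spec_parse_varieties parse_varieties parse_varieties_alt
  have h := main_lemma (PySem.Str.split₀ value) (split₀_good value) [] (by simp)
  simpa [detailOf] using h
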